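-- pv_equiv track=rewrite | github.com/edjah/Euler | problems/201-300/p268.py | find_prods_by_num_distinct_primes
-- ===== SOURCE A (Python) =====
-- def find_prods_by_num_distinct_primes(limit, primes):
--     prods_by_num_distinct = [set() for _ in range(5)]
--     prods_by_num_distinct[0] |= {1}
--
--     def add_prods(prod, i, num_distinct):
--         if prod >= limit or i >= len(primes):
--             return
--
--         # not_used = (prod % primes[i] != 0)
--         # if not not_used:
--         prods_by_num_distinct[min(num_distinct, 4)].add(prod)
--
--         add_prods(prod * primes[i], i + 1, num_distinct + 1)
--         add_prods(prod, i + 1, num_distinct)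
--
--     add_prods(1, 0, 0)
--     return [sorted(s) for s in prods_by_num_distinct]
-- ===== SOURCE B (Python) =====
-- def find_prods_by_num_distinct_primes(limit, primes):
--     # Level-synchronous DP: `live` is the frontier of distinct (product, count)
--     # states still below the limit; record the frontier, then advance it past
--     # the current prime (either taking the prime or not).
--     out = [set() for _ in range(5)]
--     out[0].add(1)
--     live = {(1, 0)} if 1 < limit else set()
--     for p in primes:
--         for prod, k in live:
--             out[min(k, 4)].add(prod)
--         live = {(prod * f, k + d)
--                 for prod, k in live
--                 for f, d in ((p, 1), (1, 0))
--                 if prod * f < limit}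
--     return [sorted(s) for s in out]
-- ===== Notes on version B (the rewrite author's own statement) =====
-- stated objective: alternative
-- what changed: A explores an include/exclude binary recursion tree (one node per subset prefix); B runs a level-synchronous breadth-first DP that keeps a deduplicated frontier set of (product, distinct-count) states below the limit, records the frontier, and advances it past each prime in one loop.
import Mathlib
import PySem

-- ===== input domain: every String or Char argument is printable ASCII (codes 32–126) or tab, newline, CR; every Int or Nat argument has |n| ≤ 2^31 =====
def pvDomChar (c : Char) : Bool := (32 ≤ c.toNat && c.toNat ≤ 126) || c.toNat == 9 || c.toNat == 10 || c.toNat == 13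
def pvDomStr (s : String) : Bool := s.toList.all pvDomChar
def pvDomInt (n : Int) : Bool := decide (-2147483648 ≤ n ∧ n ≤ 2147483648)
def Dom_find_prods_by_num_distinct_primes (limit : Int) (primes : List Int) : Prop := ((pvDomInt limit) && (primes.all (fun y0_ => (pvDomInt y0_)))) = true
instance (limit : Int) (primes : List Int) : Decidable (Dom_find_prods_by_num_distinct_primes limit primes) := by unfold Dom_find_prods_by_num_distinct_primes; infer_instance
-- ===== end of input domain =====

-- B replaces A's include/exclude binary recursion by a level-synchronous
-- breadth-first DP over a deduplicated frontier of (product, count) states;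
-- objective: alternative, same value everywhere.

-- the initial `[set() for _ in range(5)]` with 1 added to slot 0 (both Pythons
-- build this same literal list of five sets)
def pvInit : List (PySem.Set Int) :=
  [PySem.Set.ofList [1], PySem.Set.empty, PySem.Set.empty, PySem.Set.empty, PySem.Set.empty]

-- `out[b].add(x)` on the list of five sets (used by both ports)
def pvAdd (st : List (PySem.Set Int)) (b : Nat) (x : Int) : List (PySem.Set Int) :=
  st.modify b (fun s => PySem.Set.add s x)

-- ===== PORT A =====
-- the nested `add_prods(prod, i, num_distinct)` of A, state passed explicitly;
-- `fuel` is only a structural-recursion guard: any fuel ≥ primes.length - i gives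
-- the Python's behaviour (with fuel = 0 the guard i ≥ len(primes) already holds)
def pvAddProds (limit : Int) (primes : List Int) :
    Nat → Int → Nat → Nat → List (PySem.Set Int) → List (PySem.Set Int)
  | 0, _, _, _, st => st
  | fuel + 1, prod, i, nd, st =>
    if limit ≤ prod ∨ primes.length ≤ i then st
    else
      pvAddProds limit primes fuel prod (i + 1) nd
        (pvAddProds limit primes fuel (prod * primes.getD i 0) (i + 1) (nd + 1)
          (pvAdd st (min nd 4) prod))

def find_prods_by_num_distinct_primes (limit : Int) (primes : List Int) : List (List Int) :=
  (pvAddProds limit primes primes.length 1 0 0 pvInit).map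
    (fun s => PySem.List.sorted s (fun x => x))

-- ===== PORT B =====
-- one element of Source B's set comprehension: for a state (prod, k), try the two
-- candidates (prod*p, k+1) and (prod*1, k) in order, keeping those below limit
def pvBnextStep (limit p : Int) (acc : PySem.Set (Int × Nat)) (s : Int × Nat) :
    PySem.Set (Int × Nat) :=
  let acc1 := if s.1 * p < limit then PySem.Set.add acc (s.1 * p, s.2 + 1) else acc
  if s.1 * 1 < limit then PySem.Set.add acc1 (s.1 * 1, s.2) else acc1

-- `live = {(prod*f, k+d) for prod,k in live for f,d in ((p,1),(1,0)) if prod*f < limit}`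
def pvBnext (limit p : Int) (live : List (Int × Nat)) : PySem.Set (Int × Nat) :=
  live.foldl (pvBnextStep limit p) PySem.Set.empty

-- `for prod, k in live: out[min(k, 4)].add(prod)`
def pvBrecord (st : List (PySem.Set Int)) (live : List (Int × Nat)) : List (PySem.Set Int) :=
  live.foldl (fun st s => pvAdd st (min s.2 4) s.1) st

-- the `for p in primes:` loop of Source B
def pvBloop (limit : Int) : List Int → List (Int × Nat) → List (PySem.Set Int) → List (PySem.Set Int)
  | [], _, st => st
  | p :: ps, live, st => pvBloop limit ps (pvBnext limit p live) (pvBrecord st live)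

def find_prods_by_num_distinct_primes_alt (limit : Int) (primes : List Int) : List (List Int) :=
  (pvBloop limit primes (if 1 < limit then [(1, 0)] else []) pvInit).map
    (fun s => PySem.List.sorted s (fun x => x))

-- ===== PRECONDITION & SPEC =====
def Spec_find_prods_by_num_distinct_primes (limit : Int) (primes : List Int) (out : List (List Int)) : Prop := out = find_prods_by_num_distinct_primes_alt limit primes
instance (limit : Int) (primes : List Int) (out : List (List Int)) : Decidable (Spec_find_prods_by_num_distinct_primes limit primes out) := by unfold Spec_find_prods_by_num_distinct_primes; infer_instance

-- ===== CLAIM (what is proved, stated in full; the proofs are below) =====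
def Claim_equal_find_prods_by_num_distinct_primes : Prop := ∀ (limit : Int) (primes : List Int), Dom_find_prods_by_num_distinct_primes limit primes → Spec_find_prods_by_num_distinct_primes limit primes (find_prods_by_num_distinct_primes limit primes)

-- ===== LEMMAS AND PROOFS =====

-- the (product, count) states produced from a state by one level step
def pvNextL (limit p : Int) (l : List (Int × Nat)) : List (Int × Nat) :=
  l.flatMap (fun s =>
    (if s.1 * p < limit then [(s.1 * p, s.2 + 1)] else []) ++
    (if s.1 < limit then [(s.1, s.2)] else []))

-- all states recorded while consuming the prime list from a given frontier
def pvRec (limit : Int) : List Int → List (Int × Nat) → List (Int × Nat)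
  | [], _ => []
  | p :: ps, l => l ++ pvRec limit ps (pvNextL limit p l)

theorem pv_getD_pvAdd (st : List (PySem.Set Int)) (b : Nat) (x : Int) (b' : Nat) :
    (pvAdd st b x).getD b' [] =
      if b' = b ∧ b < st.length then PySem.Set.add (st.getD b' []) x else st.getD b' [] := by
  simp only [pvAdd, List.getD_eq_getElem?_getD, List.getElem?_modify]
  by_cases he : b' = b
  · subst he
    by_cases hb : b' < st.length
    · simp [hb]
    · simp [hb]
  · have hne : b ≠ b' := fun h => he h.symm
    simp [he, hne]

theorem pv_length_pvAdd (st : List (PySem.Set Int)) (b : Nat) (x : Int) :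
    (pvAdd st b x).length = st.length := by
  simp [pvAdd]

theorem pv_mem_pvAdd (st : List (PySem.Set Int)) (b : Nat) (x : Int) (b' : Nat) (y : Int) :
    y ∈ (pvAdd st b x).getD b' [] ↔
      y ∈ st.getD b' [] ∨ (b' = b ∧ b < st.length ∧ y = x) := by
  rw [pv_getD_pvAdd]
  split_ifs with h
  · rw [PySem.Set.mem_add]; tauto
  · tauto

-- helper: A's recursion does nothing when the product is out of bounds
theorem pvAddProds_of_ge (limit : Int) (primes : List Int) (f : Nat) (prod : Int)
    (i nd : Nat) (st : List (PySem.Set Int)) (h : limit ≤ prod) :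
    pvAddProds limit primes f prod i nd st = st := by
  cases f with
  | zero => rfl
  | succ f => rw [pvAddProds, if_pos (Or.inl h)]

theorem pv_length_pvAddProds (limit : Int) (primes : List Int) :
    ∀ (fuel : Nat) (prod : Int) (i nd : Nat) (st : List (PySem.Set Int)),
      (pvAddProds limit primes fuel prod i nd st).length = st.length := by
  intro fuel
  induction fuel with
  | zero => intro prod i nd st; rfl
  | succ f ih =>
    intro prod i nd st
    rw [pvAddProds]
    split_ifs with hg
    · rfl
    · rw [ih, ih, pv_length_pvAdd]

theorem pv_length_pvBrecord (st : List (PySem.Set Int)) (live : List (Int × Nat)) :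
    (pvBrecord st live).length = st.length := by
  induction live generalizing st with
  | nil => rfl
  | cons s l ih =>
    simp only [pvBrecord, List.foldl_cons]
    show (pvBrecord (pvAdd st (min s.2 4) s.1) l).length = st.length
    rw [ih, pv_length_pvAdd]

theorem pv_length_pvBloop (limit : Int) :
    ∀ (ps : List Int) (live : List (Int × Nat)) (st : List (PySem.Set Int)),
      (pvBloop limit ps live st).length = st.length := by
  intro ps
  induction ps with
  | nil => intro live st; rfl
  | cons p ps ih => intro live st; rw [pvBloop, ih, pv_length_pvBrecord]

-- pvNextL distributes over append
theorem pvNextL_append (limit p : Int) (l1 l2 : List (Int × Nat)) :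
    pvNextL limit p (l1 ++ l2) = pvNextL limit p l1 ++ pvNextL limit p l2 := by
  simp [pvNextL]

theorem pvRec_nil (limit : Int) (ps : List Int) : pvRec limit ps [] = [] := by
  induction ps with
  | nil => rfl
  | cons p ps ih => rw [pvRec]; simpa [pvNextL] using ih

theorem pv_mem_pvRec_append (limit : Int) :
    ∀ (ps : List Int) (l1 l2 : List (Int × Nat)) (s : Int × Nat),
      s ∈ pvRec limit ps (l1 ++ l2) ↔ s ∈ pvRec limit ps l1 ∨ s ∈ pvRec limit ps l2 := by
  intro ps
  induction ps with
  | nil => intro l1 l2 s; simp [pvRec]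
  | cons p ps ih =>
    intro l1 l2 s
    rw [pvRec, pvRec, pvRec, pvNextL_append]
    simp only [List.mem_append, ih]
    tauto

-- pvRec only depends on the membership of the frontier
theorem pv_mem_pvNextL_congr (limit p : Int) {l l' : List (Int × Nat)}
    (h : ∀ s, s ∈ l ↔ s ∈ l') : ∀ s, s ∈ pvNextL limit p l ↔ s ∈ pvNextL limit p l' := by
  intro s
  simp only [pvNextL, List.mem_flatMap]
  constructor
  · rintro ⟨t, ht, hs⟩; exact ⟨t, (h t).mp ht, hs⟩
  · rintro ⟨t, ht, hs⟩; exact ⟨t, (h t).mpr ht, hs⟩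

theorem pv_mem_pvRec_congr (limit : Int) :
    ∀ (ps : List Int) {l l' : List (Int × Nat)},
      (∀ s, s ∈ l ↔ s ∈ l') → ∀ s, s ∈ pvRec limit ps l ↔ s ∈ pvRec limit ps l' := by
  intro ps
  induction ps with
  | nil => intro l l' h s; simp [pvRec]
  | cons p ps ih =>
    intro l l' h s
    rw [pvRec, pvRec]
    simp only [List.mem_append]
    exact or_congr (h s) (ih (pv_mem_pvNextL_congr limit p h) s)

-- membership of B's frontier step equals pvNextL
theorem pv_mem_pvBnext_aux (limit p : Int) :
    ∀ (l : List (Int × Nat)) (acc : PySem.Set (Int × Nat)) (s : Int × Nat),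
      s ∈ l.foldl (pvBnextStep limit p) acc ↔ s ∈ acc ∨ s ∈ pvNextL limit p l := by
  intro l
  induction l with
  | nil => intro acc s; simp [pvNextL]
  | cons t l ih =>
    intro acc s
    rw [List.foldl_cons, ih]
    have hstep : s ∈ pvBnextStep limit p acc t ↔
        s ∈ acc ∨ (t.1 * p < limit ∧ s = (t.1 * p, t.2 + 1)) ∨ (t.1 < limit ∧ s = (t.1, t.2)) := by
      unfold pvBnextStep
      rw [mul_one]
      split_ifs with h1 h2 h2 <;> simp [PySem.Set.mem_add, h1, h2]
      tauto
    rw [hstep]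
    have hnl : s ∈ pvNextL limit p (t :: l) ↔
        ((t.1 * p < limit ∧ s = (t.1 * p, t.2 + 1)) ∨ (t.1 < limit ∧ s = (t.1, t.2))) ∨
          s ∈ pvNextL limit p l := by
      simp only [pvNextL, List.flatMap_cons, List.mem_append]
      constructor
      · rintro (h | h)
        · left
          revert h
          split_ifs with h1 h2 h2 <;> simp <;> tauto
        · right; exact h
      · rintro (h | h)
        · left
          revert h
          split_ifs with h1 h2 h2 <;> simp <;> tauto
        · right; exact h
    rw [hnl]
    tauto

theorem pv_mem_pvBnext (limit p : Int) (l : List (Int × Nat)) (s : Int × Nat) :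
    s ∈ pvBnext limit p l ↔ s ∈ pvNextL limit p l := by
  rw [pvBnext, pv_mem_pvBnext_aux]
  simp [PySem.Set.empty]

-- membership after recording a frontier
theorem pv_mem_pvBrecord :
    ∀ (live : List (Int × Nat)) (st : List (PySem.Set Int)), st.length = 5 →
      ∀ (b : Nat) (x : Int),
        x ∈ (pvBrecord st live).getD b [] ↔
          x ∈ st.getD b [] ∨ ∃ k, (x, k) ∈ live ∧ b = min k 4 := by
  intro live
  induction live with
  | nil => intro st _ b x; simp [pvBrecord]
  | cons s l ih =>
    intro st hL b x
    simp only [pvBrecord, List.foldl_cons]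
    rw [show List.foldl (fun st s => pvAdd st (min s.2 4) s.1) (pvAdd st (min s.2 4) s.1) l =
        pvBrecord (pvAdd st (min s.2 4) s.1) l from rfl,
      ih _ (by rw [pv_length_pvAdd]; exact hL), pv_mem_pvAdd, hL]
    constructor
    · rintro ((h | ⟨rfl, -, rfl⟩) | ⟨k, hk, rfl⟩)
      · exact Or.inl h
      · exact Or.inr ⟨s.2, by simp, rfl⟩
      · exact Or.inr ⟨k, by simp [hk], rfl⟩
    · rintro (h | ⟨k, hk, rfl⟩)
      · exact Or.inl (Or.inl h)
      · rcases List.mem_cons.mp hk with hk | hk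
        · cases hk
          exact Or.inl (Or.inr ⟨rfl, by omega, rfl⟩)
        · exact Or.inr ⟨k, hk, rfl⟩

-- MAIN for B: membership of B's loop result
theorem pvLB (limit : Int) :
    ∀ (ps : List Int) (live : List (Int × Nat)) (st : List (PySem.Set Int)),
      st.length = 5 → ∀ (b : Nat) (x : Int),
      x ∈ (pvBloop limit ps live st).getD b [] ↔
        x ∈ st.getD b [] ∨ ∃ k, (x, k) ∈ pvRec limit ps live ∧ b = min k 4 := by
  intro ps
  induction ps with
  | nil => intro live st hL b x; simp [pvBloop, pvRec]
  | cons p ps ih =>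
    intro live st hL b x
    rw [pvBloop, ih _ _ (by rw [pv_length_pvBrecord]; exact hL),
      pv_mem_pvBrecord live st hL, pvRec]
    have hcong := pv_mem_pvRec_congr limit ps (fun s => pv_mem_pvBnext limit p live s)
    simp only [List.mem_append]
    constructor
    · rintro ((h | ⟨k, hk, rfl⟩) | ⟨k, hk, rfl⟩)
      · exact Or.inl h
      · exact Or.inr ⟨k, Or.inl hk, rfl⟩
      · exact Or.inr ⟨k, Or.inr ((hcong (x, k)).mp hk), rfl⟩
    · rintro (h | ⟨k, hk | hk, rfl⟩)
      · exact Or.inl (Or.inl h)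
      · exact Or.inl (Or.inr ⟨k, hk, rfl⟩)
      · exact Or.inr ⟨k, (hcong (x, k)).mpr hk, rfl⟩

-- MAIN for A: membership of A's recursion result
theorem pvLA (limit : Int) (primes : List Int) :
    ∀ (f : Nat) (ps : List Int) (prod : Int) (i nd : Nat) (st : List (PySem.Set Int)),
      primes.drop i = ps → ps.length ≤ f → st.length = 5 → prod < limit →
      ∀ (b : Nat) (x : Int),
      x ∈ (pvAddProds limit primes f prod i nd st).getD b [] ↔
        x ∈ st.getD b [] ∨ ∃ k, (x, k) ∈ pvRec limit ps [(prod, nd)] ∧ b = min k 4 := by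
  intro f
  induction f with
  | zero =>
    intro ps prod i nd st hdrop hlen hL hpl b x
    have : ps = [] := List.length_eq_zero_iff.mp (by omega)
    subst this
    simp [pvAddProds, pvRec]
  | succ f ih =>
    intro ps prod i nd st hdrop hlen hL hpl b x
    rw [pvAddProds]
    by_cases hi : primes.length ≤ i
    · have : ps = [] := by
        rw [← hdrop]; exact List.drop_eq_nil_of_le hi
      subst this
      rw [if_pos (Or.inr hi)]
      simp [pvRec]
    · rw [if_neg (by rintro (h | h) <;> omega)]
      rw [not_le] at hi
      obtain ⟨p, ps', hps⟩ : ∃ p ps', ps = p :: ps' := by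
        rcases ps with _ | ⟨p, ps'⟩
        · exfalso
          have := congrArg List.length hdrop
          simp at this; omega
        · exact ⟨p, ps', rfl⟩
      subst hps
      have hp : primes.getD i 0 = p := by
        have h0 : (primes.drop i)[0]? = some p := by rw [hdrop]; rfl
        rw [List.getElem?_drop, Nat.add_zero] at h0
        simp [List.getD_eq_getElem?_getD, h0]
      have hdrop' : primes.drop (i + 1) = ps' := by
        have := congrArg (List.drop 1) hdrop
        simpa [List.drop_drop, Nat.add_comm] using this
      have hlen' : ps'.length ≤ f := by simp at hlen; omega
      set st1 := pvAdd st (min nd 4) prod with hst1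
      have hL1 : st1.length = 5 := by rw [hst1, pv_length_pvAdd]; exact hL
      set st2 := pvAddProds limit primes f (prod * primes.getD i 0) (i + 1) (nd + 1) st1
        with hst2
      have hL2 : st2.length = 5 := by rw [hst2, pv_length_pvAddProds]; exact hL1
      have houter := ih ps' prod (i + 1) nd st2 hdrop' hlen' hL2 hpl b x
      -- inner call membership
      have hinner : ∀ (b : Nat) (x : Int), x ∈ st2.getD b [] ↔
          x ∈ st1.getD b [] ∨
            (prod * p < limit ∧
              ∃ k, (x, k) ∈ pvRec limit ps' [(prod * p, nd + 1)] ∧ b = min k 4) := by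
        intro b x
        rw [hst2, hp]
        by_cases hpp : prod * p < limit
        · rw [ih ps' (prod * p) (i + 1) (nd + 1) st1 hdrop' hlen' hL1 hpp b x]
          tauto
        · rw [pvAddProds_of_ge limit primes f (prod * p) (i + 1) (nd + 1) st1 (by omega)]
          tauto
      rw [houter, hinner b x, hst1, pv_mem_pvAdd, hL]
      have hmin : min nd 4 < 5 := by omega
      have hnext : pvNextL limit p [(prod, nd)] =
          (if prod * p < limit then [(prod * p, nd + 1)] else []) ++ [(prod, nd)] := by
        simp [pvNextL, hpl]
      have hR : ∀ k : Nat, (x, k) ∈ pvRec limit (p :: ps') [(prod, nd)] ↔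
          ((x = prod ∧ k = nd) ∨
            (prod * p < limit ∧ (x, k) ∈ pvRec limit ps' [(prod * p, nd + 1)]) ∨
            (x, k) ∈ pvRec limit ps' [(prod, nd)]) := by
        intro k
        rw [pvRec, hnext]
        by_cases hpp : prod * p < limit
        · rw [if_pos hpp, List.mem_append, pv_mem_pvRec_append]
          simp [Prod.ext_iff, hpp]
        · rw [if_neg hpp, List.nil_append, List.mem_append]
          simp [Prod.ext_iff, hpp]
      constructor
      · rintro (((h | ⟨rfl, -, rfl⟩) | ⟨hpp, k, hk, rfl⟩) | ⟨k, hk, rfl⟩)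
        · exact Or.inl h
        · exact Or.inr ⟨nd, (hR nd).mpr (Or.inl ⟨rfl, rfl⟩), rfl⟩
        · exact Or.inr ⟨k, (hR k).mpr (Or.inr (Or.inl ⟨hpp, hk⟩)), rfl⟩
        · exact Or.inr ⟨k, (hR k).mpr (Or.inr (Or.inr hk)), rfl⟩
      · rintro (h | ⟨k, hk, rfl⟩)
        · exact Or.inl (Or.inl (Or.inl h))
        · rcases (hR k).mp hk with ⟨rfl, rfl⟩ | ⟨hpp, hk'⟩ | hk'
          · exact Or.inl (Or.inl (Or.inr ⟨rfl, hmin, rfl⟩))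
          · exact Or.inl (Or.inr ⟨hpp, k, hk', rfl⟩)
          · exact Or.inr ⟨k, hk', rfl⟩

-- all buckets (getD view) stay duplicate-free
def pvNd (st : List (PySem.Set Int)) : Prop := ∀ b : Nat, (st.getD b []).Nodup

theorem pvNd_pvAdd {st : List (PySem.Set Int)} (h : pvNd st) (b : Nat) (x : Int) :
    pvNd (pvAdd st b x) := by
  intro b'
  rw [pv_getD_pvAdd]
  split_ifs
  · exact PySem.Set.nodup_add _ _ (h b')
  · exact h b'

theorem pvNd_pvAddProds (limit : Int) (primes : List Int) :
    ∀ (fuel : Nat) (prod : Int) (i nd : Nat) (st : List (PySem.Set Int)),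
      pvNd st → pvNd (pvAddProds limit primes fuel prod i nd st) := by
  intro fuel
  induction fuel with
  | zero => intro prod i nd st h; exact h
  | succ f ih =>
    intro prod i nd st h
    rw [pvAddProds]
    split_ifs with hg
    · exact h
    · exact ih _ _ _ _ (ih _ _ _ _ (pvNd_pvAdd h _ _))

theorem pvNd_pvBrecord :
    ∀ (live : List (Int × Nat)) (st : List (PySem.Set Int)),
      pvNd st → pvNd (pvBrecord st live) := by
  intro live
  induction live with
  | nil => intro st h; exact h
  | cons s l ih =>
    intro st h
    rw [pvBrecord] at *
    simp only [List.foldl_cons]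
    exact ih _ (pvNd_pvAdd h _ _)

theorem pvNd_pvBloop (limit : Int) :
    ∀ (ps : List Int) (live : List (Int × Nat)) (st : List (PySem.Set Int)),
      pvNd st → pvNd (pvBloop limit ps live st) := by
  intro ps
  induction ps with
  | nil => intro live st h; exact h
  | cons p ps ih => intro live st h; exact ih _ _ (pvNd_pvBrecord live st h)

-- two states with the same length, same bucket membership and duplicate-free
-- buckets sort bucket-wise to the same output
theorem pv_map_sorted_eq {st st' : List (PySem.Set Int)} (hlen : st.length = st'.length)
    (hmem : ∀ b : Nat, ∀ x : Int, x ∈ st.getD b [] ↔ x ∈ st'.getD b [])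
    (h1 : pvNd st) (h2 : pvNd st') :
    st.map (fun s => PySem.List.sorted s (fun x => x)) =
      st'.map (fun s => PySem.List.sorted s (fun x => x)) := by
  apply List.ext_getElem (by simp [hlen])
  intro n hn hn'
  simp only [List.getElem_map]
  have hns : n < st.length := by simpa using hn
  have hns' : n < st'.length := by simpa using hn'
  have e1 : st[n] = st.getD n [] := by
    rw [List.getD_eq_getElem?_getD, List.getElem?_eq_getElem hns]; rfl
  have e2 : st'[n] = st'.getD n [] := by
    rw [List.getD_eq_getElem?_getD, List.getElem?_eq_getElem hns']; rfl
  rw [PySem.List.sorted_id_eq_sorted_id_iff_perm, e1, e2,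
    List.perm_ext_iff_of_nodup (h1 n) (h2 n)]
  exact fun a => hmem n a

-- ===== VERDICT (by name: the statement is the Claim_ definition above) =====
theorem find_prods_by_num_distinct_primes_spec : Claim_equal_find_prods_by_num_distinct_primes := by
  intro limit primes _
  unfold Spec_find_prods_by_num_distinct_primes find_prods_by_num_distinct_primes
    find_prods_by_num_distinct_primes_alt
  have hnd0 : pvNd pvInit := by
    intro b
    rcases b with _ | _ | _ | _ | _ | b <;> first | decide | simp [pvInit]
  have hLA5 : (pvAddProds limit primes primes.length 1 0 0 pvInit).length = 5 :=
    pv_length_pvAddProds limit primes _ _ _ _ _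
  apply pv_map_sorted_eq
  · rw [hLA5, pv_length_pvBloop]; rfl
  · intro b x
    by_cases hlim : 1 < limit
    · rw [if_pos hlim]
      rw [pvLA limit primes primes.length primes 1 0 0 pvInit rfl (le_refl _) rfl hlim b x,
        pvLB limit primes [(1, 0)] pvInit rfl b x]
    · rw [if_neg hlim]
      rw [pvLB limit primes [] pvInit rfl b x, pvRec_nil]
      cases primes with
      | nil => simp [pvAddProds]
      | cons p ps =>
        rw [pvAddProds_of_ge limit (p :: ps) _ 1 0 0 pvInit (by omega)]
        simp
  · exact pvNd_pvAddProds limit primes primes.length 1 0 0 pvInit hnd0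
  · split_ifs <;> exact pvNd_pvBloop limit primes _ pvInit hnd0
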